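-- pv_equiv track=rewrite | github.com/liamellison02/dsa-solutions | grind75/stuff.py | largestXFigure
-- ===== SOURCE A (Python) =====
-- def largestXFigure(matrix):
--     # function to find the largest x-figure in a matrix
--     m = len(matrix)
--     n = len(matrix[0])
--     largestX = (0,0)
--     largestXLen = 0
--     a = [[0 for _ in range(n)] for _ in range(m)]
--     b = [[0 for _ in range(n)] for _ in range(m)]
--     c = [[0 for _ in range(n)] for _ in range(m)]
--     d = [[0 for _ in range(n)] for _ in range(m)]
--
--     # fill in botLeftTopRight:
--     for row in range(m-1, -1, -1):
--         for col in range(n-1, -1, -1):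
--             val = matrix[row][col]
--             if col == 0 or row == m-1 or val == 0:
--                 a[row][col] = val
--             else:
--                 a[row][col] = val + a[row+1][col-1]
--
--     # fill in botRightTopLeft:
--     for row in range(m-1, -1, -1):
--         for col in range(n):
--             val = matrix[row][col]
--             if row == m-1 or col == n-1 or val == 0:
--                 b[row][col] = val
--             else:
--                 b[row][col] = val + b[row+1][col+1]
--
--     # fill in topLeftBotRight:
--     for row in range(m):
--         for col in range(n-1, -1, -1):
--             val = matrix[row][col]
--             if row == 0 or col == 0 or val == 0:
--                 c[row][col] = val
--             else:
--                 c[row][col] = val + c[row-1][col-1]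
--
--     # fill in topRightBotLeft:
--     for row in range(m):
--         for col in range(n):
--             val = matrix[row][col]
--             if row == 0 or col == n-1 or val == 0:
--                 d[row][col] = val
--             else:
--                 d[row][col] = val + d[row-1][col+1]
--
--
--     for row in range(m):
--         for col in range(n):
--             if min(a[row][col], b[row][col], c[row][col], d[row][col]) > largestXLen:
--                 largestXLen = min(a[row][col], b[row][col], c[row][col], d[row][col])
--                 largestX = (row, col)
--
--     return largestX, largestXLen
-- ===== SOURCE B (Python) =====
-- def largestXFigure(matrix):
--     # Per-cell diagonal arm sums (no DP tables): for each cell take the min of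
--     # the four diagonal sums (stopping at a zero value or the grid edge) and
--     # keep the first row-major strict maximum.
--     m = len(matrix)
--     n = len(matrix[0])
--     best = (0, 0)
--     bestLen = 0
--     for row in range(m):
--         for col in range(n):
--             arm = min(_arm_dl(matrix, m, row, col),
--                       _arm_dr(matrix, m, n, row, col),
--                       _arm_ul(matrix, row, col),
--                       _arm_ur(matrix, n, row, col))
--             if arm > bestLen:
--                 bestLen = arm
--                 best = (row, col)
--     return best, bestLen
--
-- def _arm_dl(matrix, m, r, c):
--     v = matrix[r][c]
--     if c == 0 or r >= m - 1 or v == 0: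
--         return v
--     return v + _arm_dl(matrix, m, r + 1, c - 1)
--
-- def _arm_dr(matrix, m, n, r, c):
--     v = matrix[r][c]
--     if r >= m - 1 or c >= n - 1 or v == 0:
--         return v
--     return v + _arm_dr(matrix, m, n, r + 1, c + 1)
--
-- def _arm_ul(matrix, r, c):
--     v = matrix[r][c]
--     if r == 0 or c == 0 or v == 0:
--         return v
--     return v + _arm_ul(matrix, r - 1, c - 1)
--
-- def _arm_ur(matrix, n, r, c):
--     v = matrix[r][c]
--     if r == 0 or c >= n - 1 or v == 0:
--         return v
--     return v + _arm_ur(matrix, n, r - 1, c + 1)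
-- ===== Notes on version B (the rewrite author's own statement) =====
-- stated objective: simpler
-- what changed: Replaced A's four bottom-up DP tables and five passes over the grid by a direct per-cell computation: four small recursive helpers sum each diagonal arm on demand, no tables or extra state.
import Mathlib
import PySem

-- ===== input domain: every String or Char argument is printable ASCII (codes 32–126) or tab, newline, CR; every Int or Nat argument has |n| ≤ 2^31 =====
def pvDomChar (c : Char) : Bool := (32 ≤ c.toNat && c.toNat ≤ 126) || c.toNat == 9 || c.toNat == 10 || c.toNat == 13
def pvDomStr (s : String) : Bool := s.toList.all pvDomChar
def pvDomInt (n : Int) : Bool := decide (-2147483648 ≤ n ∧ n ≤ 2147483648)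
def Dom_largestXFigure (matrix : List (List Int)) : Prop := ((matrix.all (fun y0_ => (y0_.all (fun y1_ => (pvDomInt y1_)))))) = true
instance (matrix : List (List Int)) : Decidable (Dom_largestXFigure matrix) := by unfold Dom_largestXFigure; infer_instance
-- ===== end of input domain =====

-- B replaces A's four DP tables and five passes by a direct per-cell recursive
-- computation of the four diagonal arm sums (simpler: no tables, one scan).

-- ===== PORT A =====
-- matrix[r][c] for the in-range non-negative indices the loops produce (exact there; Pre_ keeps them in range)
def pvGet2 (t : List (List Int)) (r c : Nat) : Int := (t.getD r []).getD c 0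
-- t[r][c] = v for in-range non-negative indices (exact there)
def pvSet2 (t : List (List Int)) (r c : Nat) (v : Int) : List (List Int) :=
  t.set r ((t.getD r []).set c v)
-- [[0 for _ in range(n)] for _ in range(m)]
def pvInit (m n : Nat) : List (List Int) := List.replicate m (List.replicate n 0)

-- the body of A's first double loop; range(n-1,-1,-1) yields n-1,…,0 (all ≥ 0): ported as (List.range n).reverse over Nat (exact)
def pvRowA (matrix : List (List Int)) (m : Nat) (n : Nat) (t : List (List Int)) (row : Nat) : List (List Int) :=
  ((List.range n).reverse).foldl (fun t col =>
    let v := pvGet2 matrix row col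
    if col = 0 ∨ row = m - 1 ∨ v = 0 then pvSet2 t row col v
    else pvSet2 t row col (v + pvGet2 t (row + 1) (col - 1))) t

def pvFillA (matrix : List (List Int)) (m n : Nat) : List (List Int) :=
  ((List.range m).reverse).foldl (pvRowA matrix m n) (pvInit m n)

def pvRowB (matrix : List (List Int)) (m : Nat) (n : Nat) (t : List (List Int)) (row : Nat) : List (List Int) :=
  (List.range n).foldl (fun t col =>
    let v := pvGet2 matrix row col
    if row = m - 1 ∨ col = n - 1 ∨ v = 0 then pvSet2 t row col v
    else pvSet2 t row col (v + pvGet2 t (row + 1) (col + 1))) t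

def pvFillB (matrix : List (List Int)) (m n : Nat) : List (List Int) :=
  ((List.range m).reverse).foldl (pvRowB matrix m n) (pvInit m n)

def pvRowC (matrix : List (List Int)) (m : Nat) (n : Nat) (t : List (List Int)) (row : Nat) : List (List Int) :=
  ((List.range n).reverse).foldl (fun t col =>
    let v := pvGet2 matrix row col
    if row = 0 ∨ col = 0 ∨ v = 0 then pvSet2 t row col v
    else pvSet2 t row col (v + pvGet2 t (row - 1) (col - 1))) t

def pvFillC (matrix : List (List Int)) (m n : Nat) : List (List Int) :=
  (List.range m).foldl (pvRowC matrix m n) (pvInit m n)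

def pvRowD (matrix : List (List Int)) (m : Nat) (n : Nat) (t : List (List Int)) (row : Nat) : List (List Int) :=
  (List.range n).foldl (fun t col =>
    let v := pvGet2 matrix row col
    if row = 0 ∨ col = n - 1 ∨ v = 0 then pvSet2 t row col v
    else pvSet2 t row col (v + pvGet2 t (row - 1) (col + 1))) t

def pvFillD (matrix : List (List Int)) (m n : Nat) : List (List Int) :=
  (List.range m).foldl (pvRowD matrix m n) (pvInit m n)

-- m = len(matrix); n = len(matrix[0]) (matrix[0] raises on []; Pre_ excludes that, headD is exact otherwise)
def largestXFigure (matrix : List (List Int)) : (Int × Int) × Int :=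
  let m := matrix.length
  let n := (matrix.headD []).length
  let a := pvFillA matrix m n
  let b := pvFillB matrix m n
  let c := pvFillC matrix m n
  let d := pvFillD matrix m n
  (List.range m).foldl (fun st row =>
    (List.range n).foldl (fun st col =>
      let mn := min (pvGet2 a row col) (min (pvGet2 b row col) (min (pvGet2 c row col) (pvGet2 d row col)))
      if mn > st.2 then (((row : Int), (col : Int)), mn) else st) st) ((0, 0), 0)

-- ===== PORT B =====
def pvArmDL (matrix : List (List Int)) (m : Nat) (r c : Nat) : Int :=
  let v := pvGet2 matrix r c
  if c = 0 ∨ m - 1 ≤ r ∨ v = 0 then v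
  else v + pvArmDL matrix m (r + 1) (c - 1)
termination_by c
decreasing_by rename_i h; simp [not_or] at h; omega

def pvArmDR (matrix : List (List Int)) (m n : Nat) (r c : Nat) : Int :=
  let v := pvGet2 matrix r c
  if m - 1 ≤ r ∨ n - 1 ≤ c ∨ v = 0 then v
  else v + pvArmDR matrix m n (r + 1) (c + 1)
termination_by m - r
decreasing_by rename_i h; simp [not_or] at h; omega

def pvArmUL (matrix : List (List Int)) (r c : Nat) : Int :=
  let v := pvGet2 matrix r c
  if r = 0 ∨ c = 0 ∨ v = 0 then v
  else v + pvArmUL matrix (r - 1) (c - 1)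
termination_by r
decreasing_by rename_i h; simp [not_or] at h; omega

def pvArmUR (matrix : List (List Int)) (n : Nat) (r c : Nat) : Int :=
  let v := pvGet2 matrix r c
  if r = 0 ∨ n - 1 ≤ c ∨ v = 0 then v
  else v + pvArmUR matrix n (r - 1) (c + 1)
termination_by r
decreasing_by rename_i h; simp [not_or] at h; omega

def largestXFigure_alt (matrix : List (List Int)) : (Int × Int) × Int :=
  let m := matrix.length
  let n := (matrix.headD []).length
  (List.range m).foldl (fun st row =>
    (List.range n).foldl (fun st col =>
      let arm := min (pvArmDL matrix m row col) (min (pvArmDR matrix m n row col)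
                   (min (pvArmUL matrix row col) (pvArmUR matrix n row col)))
      if arm > st.2 then (((row : Int), (col : Int)), arm) else st) st) ((0, 0), 0)

-- ===== PRECONDITION & SPEC =====
-- Pre_ excludes exactly the inputs on which Python A raises IndexError: the empty matrix
-- (matrix[0]) and ragged matrices with a row shorter than the first row (matrix[row][col]).
def Pre_largestXFigure (matrix : List (List Int)) : Prop :=
  matrix ≠ [] ∧ ∀ row ∈ matrix, (matrix.headD []).length ≤ row.length
instance (matrix : List (List Int)) : Decidable (Pre_largestXFigure matrix) := by
  unfold Pre_largestXFigure; infer_instance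

def pvWitness_largestXFigure : List (List Int) := [[1, 0, 1], [0, 2, 0], [1, 0, 1]]

def Spec_largestXFigure (matrix : List (List Int)) (out : (Int × Int) × Int) : Prop := out = largestXFigure_alt matrix
instance (matrix : List (List Int)) (out : (Int × Int) × Int) : Decidable (Spec_largestXFigure matrix out) := by unfold Spec_largestXFigure; infer_instance

-- ===== CLAIM (what is proved, stated in full; the proofs are below) =====
def Claim_equal_largestXFigure : Prop := ∀ (matrix : List (List Int)), Dom_largestXFigure matrix → Pre_largestXFigure matrix → Spec_largestXFigure matrix (largestXFigure matrix)

-- ===== LEMMAS AND PROOFS =====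

-- the table has m rows of n cells each
def pvShape (t : List (List Int)) (m n : Nat) : Prop :=
  t.length = m ∧ ∀ r < m, (t.getD r []).length = n

theorem pvGetD_set_self {α : Type} (d : α) (t : List α) (r : Nat) (x : α)
    (h : r < t.length) : (t.set r x).getD r d = x := by
  simp [List.getD_eq_getElem?_getD, List.getElem?_set_self h]

theorem pvGetD_set_ne {α : Type} (d : α) (t : List α) (r r' : Nat) (x : α)
    (h : r' ≠ r) : (t.set r x).getD r' d = t.getD r' d := by
  simp [List.getD_eq_getElem?_getD, List.getElem?_set_ne (by omega : r ≠ r')]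

theorem pvShape_init (m n : Nat) : pvShape (pvInit m n) m n := by
  refine ⟨List.length_replicate, fun r hr => ?_⟩
  simp [pvInit, List.getD_eq_getElem?_getD, List.getElem?_replicate, hr]

theorem pvShape_set2 {t : List (List Int)} {m n : Nat} (h : pvShape t m n)
    (r c : Nat) (v : Int) : pvShape (pvSet2 t r c v) m n := by
  obtain ⟨h1, h2⟩ := h
  refine ⟨by simp [pvSet2, h1], fun r' hr' => ?_⟩
  unfold pvSet2
  by_cases hrr : r' = r
  · subst hrr
    by_cases hlt : r' < t.length
    · rw [pvGetD_set_self _ _ _ _ hlt, List.length_set]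
      exact h2 r' hr'
    · rw [List.set_eq_of_length_le (by omega)]
      exact h2 r' hr'
  · rw [pvGetD_set_ne _ _ _ _ _ hrr]
    exact h2 r' hr'

theorem pvGet2_set2_self {t : List (List Int)} {m n : Nat} (h : pvShape t m n)
    {r c : Nat} (hr : r < m) (hc : c < n) (v : Int) :
    pvGet2 (pvSet2 t r c v) r c = v := by
  have hrl : r < t.length := by rw [h.1]; exact hr
  have hcl : c < (t.getD r []).length := by rw [h.2 r hr]; exact hc
  unfold pvGet2 pvSet2
  rw [pvGetD_set_self _ _ _ _ hrl, pvGetD_set_self _ _ _ _ hcl]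

theorem pvGet2_set2_ne {t : List (List Int)} {r c r' c' : Nat}
    (hne : r' ≠ r ∨ c' ≠ c) (v : Int) :
    pvGet2 (pvSet2 t r c v) r' c' = pvGet2 t r' c' := by
  unfold pvGet2 pvSet2
  by_cases hrr : r' = r
  · subst hrr
    have hcc : c' ≠ c := by tauto
    by_cases hlt : r' < t.length
    · rw [pvGetD_set_self _ _ _ _ hlt, pvGetD_set_ne _ _ _ _ _ hcc]
    · rw [List.set_eq_of_length_le (by omega)]
  · rw [pvGetD_set_ne _ _ _ _ _ hrr]

theorem pvfoldl_range_rev_succ {α} (f : α → Nat → α) (t : α) (k : Nat) :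
    ((List.range (k + 1)).reverse).foldl f t = ((List.range k).reverse).foldl f (f t k) := by
  simp [List.range_succ]

theorem pvfoldl_range_succ {α} (f : α → Nat → α) (t : α) (k : Nat) :
    (List.range (k + 1)).foldl f t = f ((List.range k).foldl f t) k := by
  simp [List.range_succ]

-- generic inner loop, columns traversed n-1 … 0 (used for tables a and c)
theorem pvInner_rev (m n row : Nat)
    (f : List (List Int) → Nat → List (List Int)) (P : List (List Int) → Prop) (tgt : Nat → Int)
    (hP : ∀ t t', pvShape t m n → pvShape t' m n →
        (∀ r' c', r' ≠ row → pvGet2 t' r' c' = pvGet2 t r' c') → P t → P t')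
    (hf : ∀ t c, c < n → pvShape t m n → P t →
        pvShape (f t c) m n ∧
        (∀ r' c', (r' ≠ row ∨ c' ≠ c) → pvGet2 (f t c) r' c' = pvGet2 t r' c') ∧
        pvGet2 (f t c) row c = tgt c) :
    ∀ k, k ≤ n → ∀ t, pvShape t m n → P t →
      pvShape (((List.range k).reverse).foldl f t) m n ∧
      (∀ r' c', (r' ≠ row ∨ k ≤ c') →
        pvGet2 (((List.range k).reverse).foldl f t) r' c' = pvGet2 t r' c') ∧
      (∀ c < k, pvGet2 (((List.range k).reverse).foldl f t) row c = tgt c) := by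
  intro k
  induction k with
  | zero =>
    intro _ t ht hPt
    exact ⟨ht, fun r' c' _ => rfl, fun c hc => absurd hc (Nat.not_lt_zero c)⟩
  | succ k ih =>
    intro hk t ht hPt
    rw [pvfoldl_range_rev_succ]
    obtain ⟨hS1, hU1, hV1⟩ := hf t k (by omega) ht hPt
    have hP1 : P (f t k) := hP t (f t k) ht hS1 (fun r' c' hne => hU1 r' c' (Or.inl hne)) hPt
    obtain ⟨hS2, hU2, hV2⟩ := ih (by omega) (f t k) hS1 hP1
    refine ⟨hS2, ?_, ?_⟩
    · intro r' c' hcase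
      rw [hU2 r' c' (by rcases hcase with h | h; exact Or.inl h; exact Or.inr (by omega)),
          hU1 r' c' (by rcases hcase with h | h; exact Or.inl h; exact Or.inr (by omega))]
    · intro c hc
      by_cases hck : c = k
      · subst hck; rw [hU2 _ _ (Or.inr le_rfl)]; exact hV1
      · exact hV2 c (by omega)

-- generic inner loop, columns traversed 0 … n-1 (used for tables b and d)
theorem pvInner_fwd (m n row : Nat)
    (f : List (List Int) → Nat → List (List Int)) (P : List (List Int) → Prop) (tgt : Nat → Int)
    (hP : ∀ t t', pvShape t m n → pvShape t' m n →
        (∀ r' c', r' ≠ row → pvGet2 t' r' c' = pvGet2 t r' c') → P t → P t')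
    (hf : ∀ t c, c < n → pvShape t m n → P t →
        pvShape (f t c) m n ∧
        (∀ r' c', (r' ≠ row ∨ c' ≠ c) → pvGet2 (f t c) r' c' = pvGet2 t r' c') ∧
        pvGet2 (f t c) row c = tgt c) :
    ∀ k, k ≤ n → ∀ t, pvShape t m n → P t →
      pvShape ((List.range k).foldl f t) m n ∧
      (∀ r' c', (r' ≠ row ∨ k ≤ c') →
        pvGet2 ((List.range k).foldl f t) r' c' = pvGet2 t r' c') ∧
      (∀ c < k, pvGet2 ((List.range k).foldl f t) row c = tgt c) := by
  intro k
  induction k with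
  | zero =>
    intro _ t ht hPt
    exact ⟨ht, fun r' c' _ => rfl, fun c hc => absurd hc (Nat.not_lt_zero c)⟩
  | succ k ih =>
    intro hk t ht hPt
    rw [pvfoldl_range_succ]
    obtain ⟨hS1, hU1, hV1⟩ := ih (by omega) t ht hPt
    have hP1 : P ((List.range k).foldl f t) :=
      hP t _ ht hS1 (fun r' c' hne => hU1 r' c' (Or.inl hne)) hPt
    obtain ⟨hS2, hU2, hV2⟩ := hf _ k (by omega) hS1 hP1
    refine ⟨hS2, ?_, ?_⟩
    · intro r' c' hcase
      rw [hU2 r' c' (by rcases hcase with h | h; exact Or.inl h; exact Or.inr (by omega)),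
          hU1 r' c' (by rcases hcase with h | h; exact Or.inl h; exact Or.inr (by omega))]
    · intro c hc
      by_cases hck : c = k
      · subst hck; exact hV2
      · rw [hU2 row c (Or.inr hck)]; exact hV1 c (by omega)

-- generic outer loop, rows traversed m-1 … 0 (tables a, b: each row depends on the row below)
theorem pvOuter_rev (m n : Nat)
    (rowOp : List (List Int) → Nat → List (List Int)) (tgt : Nat → Nat → Int)
    (hrow : ∀ t row, row < m → pvShape t m n →
        (∀ r', row < r' → r' < m → ∀ c' < n, pvGet2 t r' c' = tgt r' c') →
        pvShape (rowOp t row) m n ∧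
        (∀ r' c', r' ≠ row → pvGet2 (rowOp t row) r' c' = pvGet2 t r' c') ∧
        (∀ c < n, pvGet2 (rowOp t row) row c = tgt row c)) :
    ∀ k, k ≤ m → ∀ t, pvShape t m n →
      (∀ r', k ≤ r' → r' < m → ∀ c' < n, pvGet2 t r' c' = tgt r' c') →
      pvShape (((List.range k).reverse).foldl rowOp t) m n ∧
      (∀ r' < m, ∀ c' < n, pvGet2 (((List.range k).reverse).foldl rowOp t) r' c' = tgt r' c') := by
  intro k
  induction k with
  | zero =>
    intro _ t ht hcor
    exact ⟨ht, fun r' hr' c' hc' => hcor r' (Nat.zero_le _) hr' c' hc'⟩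
  | succ k ih =>
    intro hk t ht hcor
    rw [pvfoldl_range_rev_succ]
    obtain ⟨hS1, hU1, hV1⟩ :=
      hrow t k (by omega) ht (fun r' h1 h2 c' hc' => hcor r' (by omega) h2 c' hc')
    refine ih (by omega) (rowOp t k) hS1 ?_
    intro r' h1 h2 c' hc'
    by_cases hrk : r' = k
    · subst hrk; exact hV1 c' hc'
    · rw [hU1 r' c' hrk]; exact hcor r' (by omega) h2 c' hc'

-- generic outer loop, rows traversed 0 … m-1 (tables c, d: each row depends on the row above)
theorem pvOuter_fwd (m n : Nat)
    (rowOp : List (List Int) → Nat → List (List Int)) (tgt : Nat → Nat → Int)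
    (hrow : ∀ t row, row < m → pvShape t m n →
        (∀ r' < row, ∀ c' < n, pvGet2 t r' c' = tgt r' c') →
        pvShape (rowOp t row) m n ∧
        (∀ r' c', r' ≠ row → pvGet2 (rowOp t row) r' c' = pvGet2 t r' c') ∧
        (∀ c < n, pvGet2 (rowOp t row) row c = tgt row c)) :
    ∀ k, k ≤ m → ∀ t, pvShape t m n →
      pvShape ((List.range k).foldl rowOp t) m n ∧
      (∀ r' < k, ∀ c' < n, pvGet2 ((List.range k).foldl rowOp t) r' c' = tgt r' c') := by
  intro k
  induction k with
  | zero =>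
    intro _ t ht
    exact ⟨ht, fun r' hr' => absurd hr' (by omega)⟩
  | succ k ih =>
    intro hk t ht
    rw [pvfoldl_range_succ]
    obtain ⟨hS1, hC1⟩ := ih (by omega) t ht
    obtain ⟨hS2, hU2, hV2⟩ := hrow _ k (by omega) hS1 (fun r' hr' c' hc' => hC1 r' hr' c' hc')
    refine ⟨hS2, ?_⟩
    intro r' hr' c' hc'
    by_cases hrk : r' = k
    · subst hrk; exact hV2 c' hc'
    · rw [hU2 r' c' hrk]; exact hC1 r' (by omega) c' hc'

theorem pvFillA_get (matrix : List (List Int)) (m n : Nat) :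
    ∀ r < m, ∀ c < n, pvGet2 (pvFillA matrix m n) r c = pvArmDL matrix m r c := by
  have hrow : ∀ t row, row < m → pvShape t m n →
      (∀ r', row < r' → r' < m → ∀ c' < n, pvGet2 t r' c' = pvArmDL matrix m r' c') →
      pvShape (pvRowA matrix m n t row) m n ∧
      (∀ r' c', r' ≠ row → pvGet2 (pvRowA matrix m n t row) r' c' = pvGet2 t r' c') ∧
      (∀ c < n, pvGet2 (pvRowA matrix m n t row) row c = pvArmDL matrix m row c) := by
    intro t row hrowm ht hcor
    have hinner := pvInner_rev m n row
      (fun t col =>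
        let v := pvGet2 matrix row col
        if col = 0 ∨ row = m - 1 ∨ v = 0 then pvSet2 t row col v
        else pvSet2 t row col (v + pvGet2 t (row + 1) (col - 1)))
      (fun t => ∀ r', row < r' → r' < m → ∀ c' < n, pvGet2 t r' c' = pvArmDL matrix m r' c')
      (fun c => pvArmDL matrix m row c)
      (fun t t' _ _ hun hPt r' h1 h2 c' hc' => by
        rw [hun r' c' (by omega)]; exact hPt r' h1 h2 c' hc')
      (fun t c hcn ht hPt => by
        refine ⟨?_, ?_, ?_⟩
        · dsimp only; split_ifs <;> exact pvShape_set2 ht _ _ _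
        · intro r' c' hne; dsimp only; split_ifs <;> exact pvGet2_set2_ne hne _
        · dsimp only
          by_cases hcond : c = 0 ∨ row = m - 1 ∨ pvGet2 matrix row c = 0
          · rw [if_pos hcond, pvGet2_set2_self ht hrowm hcn, pvArmDL]
            rw [if_pos (by rcases hcond with h | h | h; exacts [Or.inl h, Or.inr (Or.inl (by omega)), Or.inr (Or.inr h)])]
          · push_neg at hcond
            obtain ⟨hc0, hcm, hcv⟩ := hcond
            rw [if_neg (by push_neg; exact ⟨hc0, hcm, hcv⟩), pvGet2_set2_self ht hrowm hcn,
                pvArmDL]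
            rw [if_neg (by push_neg; exact ⟨hc0, by omega, hcv⟩),
                hPt (row + 1) (by omega) (by omega) (c - 1) (by omega)])
      n le_rfl t ht hcor
    unfold pvRowA
    exact ⟨hinner.1, fun r' c' hne => hinner.2.1 r' c' (Or.inl hne), hinner.2.2⟩
  intro r hr c hc
  exact (pvOuter_rev m n (pvRowA matrix m n) (fun r c => pvArmDL matrix m r c) hrow m le_rfl
    (pvInit m n) (pvShape_init m n) (fun r' h1 h2 _ _ => absurd h1 (by omega))).2 r hr c hc

theorem pvFillB_get (matrix : List (List Int)) (m n : Nat) :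
    ∀ r < m, ∀ c < n, pvGet2 (pvFillB matrix m n) r c = pvArmDR matrix m n r c := by
  have hrow : ∀ t row, row < m → pvShape t m n →
      (∀ r', row < r' → r' < m → ∀ c' < n, pvGet2 t r' c' = pvArmDR matrix m n r' c') →
      pvShape (pvRowB matrix m n t row) m n ∧
      (∀ r' c', r' ≠ row → pvGet2 (pvRowB matrix m n t row) r' c' = pvGet2 t r' c') ∧
      (∀ c < n, pvGet2 (pvRowB matrix m n t row) row c = pvArmDR matrix m n row c) := by
    intro t row hrowm ht hcor
    have hinner := pvInner_fwd m n row
      (fun t col =>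
        let v := pvGet2 matrix row col
        if row = m - 1 ∨ col = n - 1 ∨ v = 0 then pvSet2 t row col v
        else pvSet2 t row col (v + pvGet2 t (row + 1) (col + 1)))
      (fun t => ∀ r', row < r' → r' < m → ∀ c' < n, pvGet2 t r' c' = pvArmDR matrix m n r' c')
      (fun c => pvArmDR matrix m n row c)
      (fun t t' _ _ hun hPt r' h1 h2 c' hc' => by
        rw [hun r' c' (by omega)]; exact hPt r' h1 h2 c' hc')
      (fun t c hcn ht hPt => by
        refine ⟨?_, ?_, ?_⟩
        · dsimp only; split_ifs <;> exact pvShape_set2 ht _ _ _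
        · intro r' c' hne; dsimp only; split_ifs <;> exact pvGet2_set2_ne hne _
        · dsimp only
          by_cases hcond : row = m - 1 ∨ c = n - 1 ∨ pvGet2 matrix row c = 0
          · rw [if_pos hcond, pvGet2_set2_self ht hrowm hcn, pvArmDR]
            rw [if_pos (by rcases hcond with h | h | h; exacts [Or.inl (by omega), Or.inr (Or.inl (by omega)), Or.inr (Or.inr h)])]
          · push_neg at hcond
            obtain ⟨hrm, hcn1, hcv⟩ := hcond
            rw [if_neg (by push_neg; exact ⟨hrm, hcn1, hcv⟩), pvGet2_set2_self ht hrowm hcn,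
                pvArmDR]
            rw [if_neg (by push_neg; exact ⟨by omega, by omega, hcv⟩),
                hPt (row + 1) (by omega) (by omega) (c + 1) (by omega)])
      n le_rfl t ht hcor
    unfold pvRowB
    exact ⟨hinner.1, fun r' c' hne => hinner.2.1 r' c' (Or.inl hne), hinner.2.2⟩
  intro r hr c hc
  exact (pvOuter_rev m n (pvRowB matrix m n) (fun r c => pvArmDR matrix m n r c) hrow m le_rfl
    (pvInit m n) (pvShape_init m n) (fun r' h1 h2 _ _ => absurd h1 (by omega))).2 r hr c hc

theorem pvFillC_get (matrix : List (List Int)) (m n : Nat) :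
    ∀ r < m, ∀ c < n, pvGet2 (pvFillC matrix m n) r c = pvArmUL matrix r c := by
  have hrow : ∀ t row, row < m → pvShape t m n →
      (∀ r' < row, ∀ c' < n, pvGet2 t r' c' = pvArmUL matrix r' c') →
      pvShape (pvRowC matrix m n t row) m n ∧
      (∀ r' c', r' ≠ row → pvGet2 (pvRowC matrix m n t row) r' c' = pvGet2 t r' c') ∧
      (∀ c < n, pvGet2 (pvRowC matrix m n t row) row c = pvArmUL matrix row c) := by
    intro t row hrowm ht hcor
    have hinner := pvInner_rev m n row
      (fun t col =>
        let v := pvGet2 matrix row col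
        if row = 0 ∨ col = 0 ∨ v = 0 then pvSet2 t row col v
        else pvSet2 t row col (v + pvGet2 t (row - 1) (col - 1)))
      (fun t => ∀ r' < row, ∀ c' < n, pvGet2 t r' c' = pvArmUL matrix r' c')
      (fun c => pvArmUL matrix row c)
      (fun t t' _ _ hun hPt r' h1 c' hc' => by
        rw [hun r' c' (by omega)]; exact hPt r' h1 c' hc')
      (fun t c hcn ht hPt => by
        refine ⟨?_, ?_, ?_⟩
        · dsimp only; split_ifs <;> exact pvShape_set2 ht _ _ _
        · intro r' c' hne; dsimp only; split_ifs <;> exact pvGet2_set2_ne hne _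
        · dsimp only
          by_cases hcond : row = 0 ∨ c = 0 ∨ pvGet2 matrix row c = 0
          · rw [if_pos hcond, pvGet2_set2_self ht hrowm hcn, pvArmUL]
            rw [if_pos hcond]
          · push_neg at hcond
            obtain ⟨hr0, hc0, hcv⟩ := hcond
            rw [if_neg (by push_neg; exact ⟨hr0, hc0, hcv⟩), pvGet2_set2_self ht hrowm hcn,
                pvArmUL]
            rw [if_neg (by push_neg; exact ⟨hr0, hc0, hcv⟩),
                hPt (row - 1) (by omega) (c - 1) (by omega)])
      n le_rfl t ht hcor
    unfold pvRowC
    exact ⟨hinner.1, fun r' c' hne => hinner.2.1 r' c' (Or.inl hne), hinner.2.2⟩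
  intro r hr c hc
  exact (pvOuter_fwd m n (pvRowC matrix m n) (fun r c => pvArmUL matrix r c) hrow m le_rfl
    (pvInit m n) (pvShape_init m n)).2 r hr c hc

theorem pvFillD_get (matrix : List (List Int)) (m n : Nat) :
    ∀ r < m, ∀ c < n, pvGet2 (pvFillD matrix m n) r c = pvArmUR matrix n r c := by
  have hrow : ∀ t row, row < m → pvShape t m n →
      (∀ r' < row, ∀ c' < n, pvGet2 t r' c' = pvArmUR matrix n r' c') →
      pvShape (pvRowD matrix m n t row) m n ∧
      (∀ r' c', r' ≠ row → pvGet2 (pvRowD matrix m n t row) r' c' = pvGet2 t r' c') ∧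
      (∀ c < n, pvGet2 (pvRowD matrix m n t row) row c = pvArmUR matrix n row c) := by
    intro t row hrowm ht hcor
    have hinner := pvInner_fwd m n row
      (fun t col =>
        let v := pvGet2 matrix row col
        if row = 0 ∨ col = n - 1 ∨ v = 0 then pvSet2 t row col v
        else pvSet2 t row col (v + pvGet2 t (row - 1) (col + 1)))
      (fun t => ∀ r' < row, ∀ c' < n, pvGet2 t r' c' = pvArmUR matrix n r' c')
      (fun c => pvArmUR matrix n row c)
      (fun t t' _ _ hun hPt r' h1 c' hc' => by
        rw [hun r' c' (by omega)]; exact hPt r' h1 c' hc')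
      (fun t c hcn ht hPt => by
        refine ⟨?_, ?_, ?_⟩
        · dsimp only; split_ifs <;> exact pvShape_set2 ht _ _ _
        · intro r' c' hne; dsimp only; split_ifs <;> exact pvGet2_set2_ne hne _
        · dsimp only
          by_cases hcond : row = 0 ∨ c = n - 1 ∨ pvGet2 matrix row c = 0
          · rw [if_pos hcond, pvGet2_set2_self ht hrowm hcn, pvArmUR]
            rw [if_pos (by rcases hcond with h | h | h; exacts [Or.inl h, Or.inr (Or.inl (by omega)), Or.inr (Or.inr h)])]
          · push_neg at hcond
            obtain ⟨hr0, hcn1, hcv⟩ := hcond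
            rw [if_neg (by push_neg; exact ⟨hr0, hcn1, hcv⟩), pvGet2_set2_self ht hrowm hcn,
                pvArmUR]
            rw [if_neg (by push_neg; exact ⟨hr0, by omega, hcv⟩),
                hPt (row - 1) (by omega) (c + 1) (by omega)])
      n le_rfl t ht hcor
    unfold pvRowD
    exact ⟨hinner.1, fun r' c' hne => hinner.2.1 r' c' (Or.inl hne), hinner.2.2⟩
  intro r hr c hc
  exact (pvOuter_fwd m n (pvRowD matrix m n) (fun r c => pvArmUR matrix n r c) hrow m le_rfl
    (pvInit m n) (pvShape_init m n)).2 r hr c hc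

-- the two final scans agree once the per-cell values agree
theorem pvScan_congr (m n : Nat) (f g : Nat → Nat → Int)
    (h : ∀ r < m, ∀ c < n, f r c = g r c) (st : (Int × Int) × Int) :
    (List.range m).foldl (fun st row =>
      (List.range n).foldl (fun st col =>
        if f row col > st.2 then (((row : Int), (col : Int)), f row col) else st) st) st =
    (List.range m).foldl (fun st row =>
      (List.range n).foldl (fun st col =>
        if g row col > st.2 then (((row : Int), (col : Int)), g row col) else st) st) st := by
  refine List.foldl_ext _ _ st (fun st row hrow => ?_)
  refine List.foldl_ext _ _ st (fun st col hcol => ?_)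
  rw [h row (List.mem_range.mp hrow) col (List.mem_range.mp hcol)]

-- ===== VERDICT (by name: the statement is the Claim_ definition above) =====
theorem largestXFigure_spec : Claim_equal_largestXFigure := by
  intro matrix _ _
  unfold Spec_largestXFigure largestXFigure largestXFigure_alt
  exact pvScan_congr _ _ _ _
    (fun r hr c hc => by
      rw [pvFillA_get matrix _ _ r hr c hc, pvFillB_get matrix _ _ r hr c hc,
          pvFillC_get matrix _ _ r hr c hc, pvFillD_get matrix _ _ r hr c hc]) _
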